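-- pv_equiv track=rewrite | github.com/danguu/Parcial_1 | afd_abc.py | afd
-- ===== SOURCE A (Python) =====
-- def afd(cadena):
--     estado = 0
--     for ch in cadena:
--         if estado == 0:
--             if ch == 'a':
--                 estado = 0
--             elif ch == 'b':
--                 estado = 1
--             elif ch == 'c':
--                 estado = 2
--             else:
--                 return False
--         elif estado == 1:
--             if ch == 'b':
--                 estado = 1
--             elif ch == 'c':
--                 estado = 2
--             else:
--                 return False
--         elif estado == 2:
--             if ch == 'c':
--                 estado = 2
--             else:
--                 return False
--     return True
-- ===== SOURCE B (Python) =====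
-- def afd(cadena):
--     resto = cadena.lstrip('a').lstrip('b').lstrip('c')
--     return resto == ''
-- ===== Notes on version B (the rewrite author's own statement) =====
-- stated objective: idiomatic
-- what changed: Replaces the per-character DFA loop with three staged prefix strips (lstrip 'a', then 'b', then 'c') and a final emptiness test: the string matches a*b*c* iff stripping the three blocks consumes it entirely.
import Mathlib
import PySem

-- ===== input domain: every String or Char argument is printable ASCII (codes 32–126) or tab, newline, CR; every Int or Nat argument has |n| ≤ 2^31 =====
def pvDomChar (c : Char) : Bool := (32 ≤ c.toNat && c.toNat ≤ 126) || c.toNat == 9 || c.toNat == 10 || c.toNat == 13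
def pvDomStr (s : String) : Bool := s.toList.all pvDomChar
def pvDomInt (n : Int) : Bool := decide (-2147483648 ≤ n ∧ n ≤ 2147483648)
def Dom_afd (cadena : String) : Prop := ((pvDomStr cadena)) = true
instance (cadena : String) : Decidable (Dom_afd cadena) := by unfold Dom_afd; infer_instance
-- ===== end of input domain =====

-- B replaces the per-character DFA loop with three staged prefix strips
-- (lstrip 'a', 'b', 'c') and an emptiness test; objective: idiomatic.


-- ===== PORT A =====
-- literal transliteration of A's for-loop over `cadena` with state `estado`
def afdLoop : Int → List Char → Bool
  | _, [] => true
  | estado, ch :: cs =>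
    if estado == 0 then
      if ch == 'a' then afdLoop 0 cs
      else if ch == 'b' then afdLoop 1 cs
      else if ch == 'c' then afdLoop 2 cs
      else false
    else if estado == 1 then
      if ch == 'b' then afdLoop 1 cs
      else if ch == 'c' then afdLoop 2 cs
      else false
    else if estado == 2 then
      if ch == 'c' then afdLoop 2 cs
      else false
    else afdLoop estado cs   -- Python elif chain has no final else: loop continues unchanged

def afd (cadena : String) : Bool := afdLoop 0 cadena.toList

-- ===== PORT B =====
-- Python's s.lstrip('x') for a single-character argument is exactly dropWhile (· == 'x')
-- on the code points (exact: it removes the maximal leading run of that character).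
def afd_alt (cadena : String) : Bool :=
  (((cadena.toList.dropWhile (· == 'a')).dropWhile (· == 'b')).dropWhile (· == 'c')) == []

-- ===== PRECONDITION & SPEC =====
def Spec_afd (cadena : String) (out : Bool) : Prop := out = afd_alt cadena
instance (cadena : String) (out : Bool) : Decidable (Spec_afd cadena out) := by unfold Spec_afd; infer_instance

-- ===== CLAIM (what is proved, stated in full; the proofs are below) =====
def Claim_equal_afd : Prop := ∀ (cadena : String), Dom_afd cadena → Spec_afd cadena (afd cadena)

-- ===== LEMMAS AND PROOFS =====
theorem afdLoop_two (cs : List Char) :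
    afdLoop 2 cs = (cs.dropWhile (· == 'c') == []) := by
  induction cs with
  | nil => rfl
  | cons ch cs ih =>
    by_cases hc : ch = 'c' <;> simp_all [afdLoop, List.dropWhile_cons]

theorem afdLoop_one (cs : List Char) :
    afdLoop 1 cs = ((cs.dropWhile (· == 'b')).dropWhile (· == 'c') == []) := by
  induction cs with
  | nil => rfl
  | cons ch cs ih =>
    by_cases hb : ch = 'b' <;> by_cases hc : ch = 'c' <;>
      simp_all [afdLoop, List.dropWhile_cons, afdLoop_two]

theorem afdLoop_zero (cs : List Char) :
    afdLoop 0 cs =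
      ((((cs.dropWhile (· == 'a')).dropWhile (· == 'b')).dropWhile (· == 'c')) == []) := by
  induction cs with
  | nil => rfl
  | cons ch cs ih =>
    by_cases ha : ch = 'a' <;> by_cases hb : ch = 'b' <;> by_cases hc : ch = 'c' <;>
      simp_all [afdLoop, List.dropWhile_cons, afdLoop_one, afdLoop_two]

-- ===== VERDICT (by name: the statement is the Claim_ definition above) =====
theorem afd_spec : Claim_equal_afd := by
  intro cadena _
  unfold Spec_afd afd afd_alt
  exact afdLoop_zero _
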